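-- pv_equiv track=rewrite | github.com/xusenlinzy/deepnlp | torchblocks/utils/common.py | text_segmentate
-- ===== SOURCE A (Python) =====
-- def text_segmentate(text, maxlen, seps='\n', strips=None):
--     """将文本按照标点符号划分为若干个短句
--     """
--     text = text.strip().strip(strips)
--     if not seps or len(text) <= maxlen:
--         return [text]
--     pieces = text.split(seps[0])
--     text, texts = '', []
--     for i, p in enumerate(pieces):
--         if text and p and len(text) + len(p) > maxlen - 1:
--             texts.extend(text_segmentate(text, maxlen, seps[1:], strips))
--             text = ''
--         text = text + p if i + 1 == len(pieces) else text + p + seps[0]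
--     if text:
--         texts.extend(text_segmentate(text, maxlen, seps[1:], strips))
--     return texts
-- ===== SOURCE B (Python) =====
-- def text_segmentate(text, maxlen, seps='\n', strips=None):
--     """Iterative level-by-level refinement instead of recursion: keep a list of
--     (segment, done) items and, for each separator in turn, replace every
--     unfinished segment by its packed chunks; left-to-right order equals the
--     recursive DFS order."""
--     def clean(s):
--         return s.strip().strip(strips)
--
--     def group(s, sep):
--         pieces = s.split(sep)
--         chunks, cur = [], ''
--         for i, p in enumerate(pieces):
--             if cur and p and len(cur) + len(p) > maxlen - 1:
--                 chunks.append(cur)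
--                 cur = ''
--             cur = cur + p if i + 1 == len(pieces) else cur + p + sep
--         if cur:
--             chunks.append(cur)
--         return chunks
--
--     items = [(clean(text), False)]
--     for sep in seps:
--         nxt = []
--         for s, done in items:
--             if done:
--                 nxt.append((s, True))
--             elif len(s) <= maxlen:
--                 nxt.append((s, True))
--             else:
--                 nxt.extend((clean(c), False) for c in group(s, sep))
--         items = nxt
--     return [s for s, _ in items]
-- ===== Notes on version B (the rewrite author's own statement) =====
-- stated objective: alternative
-- what changed: Replaces the recursion over the separator list (DFS with extend) by an iterative level-by-level refinement: a list of (segment, done) items is rewritten once per separator, unfinished long segments being replaced in place by their packed chunks, so left-to-right order reproduces the DFS emission order without recursion.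
import Mathlib
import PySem

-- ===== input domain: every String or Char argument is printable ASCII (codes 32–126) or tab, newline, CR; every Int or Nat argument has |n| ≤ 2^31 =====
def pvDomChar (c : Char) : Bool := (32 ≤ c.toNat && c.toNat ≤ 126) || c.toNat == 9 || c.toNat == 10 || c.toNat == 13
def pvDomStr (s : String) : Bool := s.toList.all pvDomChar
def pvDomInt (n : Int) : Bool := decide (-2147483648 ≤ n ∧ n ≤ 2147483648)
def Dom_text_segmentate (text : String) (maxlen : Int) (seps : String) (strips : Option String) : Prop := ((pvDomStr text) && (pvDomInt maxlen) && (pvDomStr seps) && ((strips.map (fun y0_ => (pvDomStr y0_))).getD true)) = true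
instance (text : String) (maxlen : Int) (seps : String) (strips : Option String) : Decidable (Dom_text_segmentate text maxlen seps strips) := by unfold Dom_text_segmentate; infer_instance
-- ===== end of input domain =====

-- B changes the decomposition only (recursion over seps → iterative per-separator rewriting of a worklist); same values, same cost.

-- ===== PORT A =====
-- text.strip().strip(strips)  (strip(None) is a whitespace strip)
def pvClean (strips : Option String) (cs : List Char) : List Char :=
  let cs := PySem.Chars.strip cs
  match strips with
  | none => PySem.Chars.strip cs
  | some s => PySem.Chars.stripChars cs s.toList

-- one iteration of A's `for i, p in enumerate(pieces)` loop; `emit` is what `texts.extend(…)` appends for a flushed accumulator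
def pvStepA {β : Type} (maxlen : Int) (sep : Char) (n : Nat) (emit : List Char → List β)
    (st : List Char × List β) (ip : Int × List Char) : List Char × List β :=
  let st := if st.1 ≠ [] ∧ ip.2 ≠ [] ∧ (st.1.length : Int) + (ip.2.length : Int) > maxlen - 1
            then ([], st.2 ++ emit st.1)
            else st
  (if ip.1 + 1 = (n : Int) then st.1 ++ ip.2 else st.1 ++ ip.2 ++ [sep], st.2)

-- the recursive body of A, on the char-list of text, recursing on the char-list of seps
def pvGoA (maxlen : Int) (strips : Option String) : List Char → List Char → List String
  | seps, t0 =>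
    let t := pvClean strips t0
    match seps with
    | [] => [String.ofList t]
    | sep :: rest =>
      if (t.length : Int) ≤ maxlen then [String.ofList t]
      else
        let pieces := PySem.Chars.splitOn t [sep]
        let st := (PySem.List.enumerate pieces).foldl
          (pvStepA maxlen sep pieces.length (fun c => pvGoA maxlen strips rest c)) ([], [])
        if st.1 ≠ [] then st.2 ++ pvGoA maxlen strips rest st.1 else st.2

def text_segmentate (text : String) (maxlen : Int) (seps : String) (strips : Option String) : List String :=
  pvGoA maxlen strips seps.toList text.toList

-- ===== PORT B =====
-- Source B's group(s, sep): split on sep and pack the pieces greedily into chunk strings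
def pvGroup (maxlen : Int) (sep : Char) (t : List Char) : List (List Char) :=
  let pieces := PySem.Chars.splitOn t [sep]
  let st := (PySem.List.enumerate pieces).foldl
    (pvStepA maxlen sep pieces.length (fun c => [c])) ([], [])
  if st.1 ≠ [] then st.2 ++ [st.1] else st.2

-- Source B's inner loop over items for one separator
def pvLevel (maxlen : Int) (strips : Option String) (sep : Char) (items : List (List Char × Bool)) : List (List Char × Bool) :=
  items.foldl
    (fun nxt it =>
      if it.2 then nxt ++ [(it.1, true)]
      else if (it.1.length : Int) ≤ maxlen then nxt ++ [(it.1, true)]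
      else nxt ++ (pvGroup maxlen sep it.1).map (fun c => (pvClean strips c, false)))
    []

def text_segmentate_alt (text : String) (maxlen : Int) (seps : String) (strips : Option String) : List String :=
  let items := seps.toList.foldl (fun items sep => pvLevel maxlen strips sep items)
    [(pvClean strips text.toList, false)]
  items.map (fun it => String.ofList it.1)

-- ===== PRECONDITION & SPEC =====
def Spec_text_segmentate (text : String) (maxlen : Int) (seps : String) (strips : Option String) (out : List String) : Prop := out = text_segmentate_alt text maxlen seps strips
instance (text : String) (maxlen : Int) (seps : String) (strips : Option String) (out : List String) : Decidable (Spec_text_segmentate text maxlen seps strips out) := by unfold Spec_text_segmentate; infer_instance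

-- ===== CLAIM (what is proved, stated in full; the proofs are below) =====
def Claim_equal_text_segmentate : Prop := ∀ (text : String) (maxlen : Int) (seps : String) (strips : Option String), Dom_text_segmentate text maxlen seps strips → Spec_text_segmentate text maxlen seps strips (text_segmentate text maxlen seps strips)

-- ===== LEMMAS AND PROOFS =====

-- A's body with the entry 'clean' moved into the recursive call sites
def pvBodyA (maxlen : Int) (strips : Option String) : List Char → List Char → List String
  | [], t => [String.ofList t]
  | sep :: rest, t =>
      if (t.length : Int) ≤ maxlen then [String.ofList t]
      else
        let pieces := PySem.Chars.splitOn t [sep]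
        let st := (PySem.List.enumerate pieces).foldl
          (pvStepA maxlen sep pieces.length (fun c => pvBodyA maxlen strips rest (pvClean strips c))) ([], [])
        if st.1 ≠ [] then st.2 ++ pvBodyA maxlen strips rest (pvClean strips st.1) else st.2

lemma pvGoA_eq_body (m : Int) (st : Option String) :
    ∀ seps t0, pvGoA m st seps t0 = pvBodyA m st seps (pvClean st t0) := by
  intro seps
  induction seps with
  | nil => intro t0; rw [pvGoA, pvBodyA]
  | cons sep rest ih =>
    intro t0
    rw [pvGoA, pvBodyA]
    have hf : (fun c => pvGoA m st rest c) = (fun c => pvBodyA m st rest (pvClean st c)) := by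
      funext c; exact ih c
    simp only [hf]

-- A applied to an already-clean segment
def pvContrib (m : Int) (st : Option String) (seps : List Char) (it : List Char × Bool) : List String :=
  if it.2 then [String.ofList it.1] else pvBodyA m st seps it.1

-- the interleaved fold of A equals: group first, then recurse on each chunk
lemma pvFold_corr (m : Int) (st : Option String) (rest : List Char) (sep : Char) (n : Nat) :
    ∀ (l : List (Int × List Char)) (cur : List Char) (chunks : List (List Char)),
      (let r := l.foldl (pvStepA m sep n (fun c => pvBodyA m st rest (pvClean st c)))
          (cur, chunks.flatMap (fun c => pvBodyA m st rest (pvClean st c)))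
       if r.1 ≠ [] then r.2 ++ pvBodyA m st rest (pvClean st r.1) else r.2)
      =
      (let r := l.foldl (pvStepA m sep n (fun c => [c])) (cur, chunks)
       if r.1 ≠ [] then r.2 ++ [r.1] else r.2).flatMap
        (fun c => pvBodyA m st rest (pvClean st c)) := by
  intro l
  induction l with
  | nil =>
    intro cur chunks
    by_cases h : cur = [] <;> simp [h, List.flatMap_append]
  | cons ip l ih =>
    intro cur chunks
    simp only [List.foldl_cons, pvStepA]
    by_cases h : cur ≠ [] ∧ ip.2 ≠ [] ∧ (cur.length : Int) + (ip.2.length : Int) > m - 1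
    · simp only [if_pos h]
      have := ih (if ip.1 + 1 = (n : Int) then [] ++ ip.2 else [] ++ ip.2 ++ [sep]) (chunks ++ [cur])
      simpa [List.flatMap_append] using this
    · simp only [if_neg h]
      exact ih (if ip.1 + 1 = (n : Int) then cur ++ ip.2 else cur ++ ip.2 ++ [sep]) chunks

lemma pvBodyA_split (m : Int) (st : Option String) (sep : Char) (rest t : List Char)
    (h : ¬ (t.length : Int) ≤ m) :
    pvBodyA m st (sep :: rest) t
      = (pvGroup m sep t).flatMap (fun c => pvBodyA m st rest (pvClean st c)) := by
  rw [pvBodyA, pvGroup]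
  simp only [if_neg h]
  exact pvFold_corr m st rest sep (PySem.Chars.splitOn t [sep]).length
    (PySem.List.enumerate (PySem.Chars.splitOn t [sep])) [] []

-- one pvLevel pass consumes one separator of the contribution
lemma pvLevel_contrib (m : Int) (st : Option String) (sep : Char) (rest : List Char)
    (items : List (List Char × Bool)) :
    (pvLevel m st sep items).flatMap (pvContrib m st rest)
      = items.flatMap (pvContrib m st (sep :: rest)) := by
  rw [pvLevel]
  have hstep : (fun (nxt : List (List Char × Bool)) (it : List Char × Bool) =>
      if it.2 then nxt ++ [(it.1, true)]
      else if (it.1.length : Int) ≤ m then nxt ++ [(it.1, true)]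
      else nxt ++ (pvGroup m sep it.1).map (fun c => (pvClean st c, false)))
      = (fun nxt it => nxt ++ (if it.2 then [(it.1, true)]
          else if (it.1.length : Int) ≤ m then [(it.1, true)]
          else (pvGroup m sep it.1).map (fun c => (pvClean st c, false)))) := by
    funext nxt it; split_ifs <;> rfl
  rw [hstep, PySem.List.foldl_append_eq_flatMap]
  rw [List.nil_append, List.flatMap_assoc]
  apply List.flatMap_congr
  intro it _
  by_cases hd : it.2
  · simp [hd, pvContrib]
  · by_cases hl : (it.1.length : Int) ≤ m
    · simp only [hd, hl, Bool.false_eq_true, if_false, if_true]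
      have : pvBodyA m st (sep :: rest) it.1 = [String.ofList it.1] := by
        rw [pvBodyA]; simp [hl]
      simp [pvContrib, hd, this]
    · simp only [hd, hl, Bool.false_eq_true, if_false]
      simp only [pvContrib, hd, Bool.false_eq_true, if_false]
      rw [pvBodyA_split m st sep rest it.1 hl, List.flatMap_map]
      apply List.flatMap_congr
      intro c _
      simp [pvContrib]

-- the driver fold over all separators
lemma pvDriver (m : Int) (st : Option String) :
    ∀ (seps : List Char) (items : List (List Char × Bool)),
      (seps.foldl (fun items sep => pvLevel m st sep items) items).map (fun it => String.ofList it.1)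
        = items.flatMap (pvContrib m st seps) := by
  intro seps
  induction seps with
  | nil =>
    intro items
    simp only [List.foldl_nil]
    induction items with
    | nil => simp
    | cons it items ih =>
      simp only [List.map_cons, List.flatMap_cons, ← ih]
      by_cases hd : it.2 <;> simp [pvContrib, hd, pvBodyA]
  | cons sep rest ih =>
    intro items
    simp only [List.foldl_cons]
    rw [ih, pvLevel_contrib]

-- ===== VERDICT (by name: the statement is the Claim_ definition above) =====
theorem text_segmentate_spec : Claim_equal_text_segmentate := by
  intro text maxlen seps strips _
  show text_segmentate text maxlen seps strips = text_segmentate_alt text maxlen seps strips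
  rw [text_segmentate, text_segmentate_alt]
  rw [pvDriver, pvGoA_eq_body]
  simp [pvContrib]
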